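-- pv_equiv track=rewrite | github.com/sparkyb/adventofcode | 2023/day18.py | build_border
-- ===== SOURCE A (Python) =====
-- def build_border(turns):
--   y, x = 0, 0
--   corners = []
--   for (dy, dx), dist in turns:
--     corners.append((y, x))
--     y = y + dy * dist
--     x = x + dx * dist
--   assert (y, x) == (0, 0)
--   return corners
-- ===== SOURCE B (Python) =====
-- def build_border(turns):
--   # Divide-and-translate recursion: corners of t::rest are (0,0) followed by
--   # the corners of rest (built at the origin), each shifted by t's displacement;
--   # the recursion also returns the total displacement for the closure check.
--   def rec(ts):
--     if not ts:
--       return (0, 0), []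
--     (dy, dx), dist = ts[0]
--     total, tail = rec(ts[1:])
--     dyd, dxd = dy * dist, dx * dist
--     return ((total[0] + dyd, total[1] + dxd),
--             [(0, 0)] + [(y + dyd, x + dxd) for (y, x) in tail])
--   total, corners = rec(turns)
--   assert total == (0, 0)
--   return corners
-- ===== Notes on version B (the rewrite author's own statement) =====
-- stated objective: alternative
-- what changed: B replaces A's forward accumulator loop by a divide-and-translate recursion: the corners of t::rest are (0,0) followed by the tail's origin-based corners each shifted by t's displacement, with the total displacement returned for the closure assert.
import Mathlib
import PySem

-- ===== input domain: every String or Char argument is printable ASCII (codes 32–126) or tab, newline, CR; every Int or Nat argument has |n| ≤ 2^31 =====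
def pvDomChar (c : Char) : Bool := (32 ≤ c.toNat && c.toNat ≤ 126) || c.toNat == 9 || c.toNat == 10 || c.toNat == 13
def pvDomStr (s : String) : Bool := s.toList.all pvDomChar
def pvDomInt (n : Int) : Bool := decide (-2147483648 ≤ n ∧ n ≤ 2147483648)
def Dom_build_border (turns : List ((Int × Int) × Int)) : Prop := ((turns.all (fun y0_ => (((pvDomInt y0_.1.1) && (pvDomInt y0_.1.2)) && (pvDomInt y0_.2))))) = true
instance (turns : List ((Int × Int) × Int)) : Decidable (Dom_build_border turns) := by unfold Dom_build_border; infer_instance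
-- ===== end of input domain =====

-- B replaces A's forward accumulator loop by a divide-and-translate recursion on the list
-- (objective: alternative decomposition; return values proved equal on Pre_).

-- ===== PORT A =====
-- state = (y, x, corners); each step appends (y, x) then advances (y, x)
def build_border (turns : List ((Int × Int) × Int)) : List (Int × Int) :=
  (turns.foldl
    (fun (s : Int × Int × List (Int × Int)) t =>
      (s.1 + t.1.1 * t.2, s.2.1 + t.1.2 * t.2, s.2.2 ++ [(s.1, s.2.1)]))
    (0, 0, [])).2.2

-- ===== PORT B =====
-- Source B's rec: returns (total displacement, corners built at the origin);
-- the head corner is (0,0) and the tail's corners are each shifted by the head displacement.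
def pvRec (ts : List ((Int × Int) × Int)) : (Int × Int) × List (Int × Int) :=
  match ts with
  | [] => ((0, 0), [])
  | t :: rest =>
      let r := pvRec rest
      let dyd := t.1.1 * t.2
      let dxd := t.1.2 * t.2
      ((r.1.1 + dyd, r.1.2 + dxd),
       (0, 0) :: r.2.map (fun p => (p.1 + dyd, p.2 + dxd)))

def build_border_alt (turns : List ((Int × Int) × Int)) : List (Int × Int) :=
  (pvRec turns).2

-- ===== PRECONDITION & SPEC =====
-- Pre_ excludes exactly the non-closing paths (total displacement ≠ (0,0)), on which
-- both A and B raise AssertionError.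
def Pre_build_border (turns : List ((Int × Int) × Int)) : Prop :=
  (turns.map (fun t => t.1.1 * t.2)).sum = 0 ∧ (turns.map (fun t => t.1.2 * t.2)).sum = 0
instance (turns : List ((Int × Int) × Int)) : Decidable (Pre_build_border turns) := by
  unfold Pre_build_border; infer_instance

def pvWitness_build_border : (List ((Int × Int) × Int)) :=
  [((0, 1), 2), ((1, 0), 3), ((0, -1), 2), ((-1, 0), 3)]

def Spec_build_border (turns : List ((Int × Int) × Int)) (out : List (Int × Int)) : Prop := out = build_border_alt turns
instance (turns : List ((Int × Int) × Int)) (out : List (Int × Int)) : Decidable (Spec_build_border turns out) := by unfold Spec_build_border; infer_instance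

-- ===== CLAIM =====
def Claim_equal_build_border : Prop := ∀ (turns : List ((Int × Int) × Int)), Dom_build_border turns → Pre_build_border turns → Spec_build_border turns (build_border turns)

-- ===== LEMMAS AND PROOFS =====

-- reference corner sequence from a start position (A's loop, recursively)
def pvCorners (y x : Int) (turns : List ((Int × Int) × Int)) : List (Int × Int) :=
  match turns with
  | [] => []
  | t :: rest => (y, x) :: pvCorners (y + t.1.1 * t.2) (x + t.1.2 * t.2) rest

theorem pvA_fold (turns : List ((Int × Int) × Int)) :
    ∀ (y x : Int) (cs : List (Int × Int)),
      (turns.foldl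
        (fun (s : Int × Int × List (Int × Int)) t =>
          (s.1 + t.1.1 * t.2, s.2.1 + t.1.2 * t.2, s.2.2 ++ [(s.1, s.2.1)]))
        (y, x, cs)).2.2 = cs ++ pvCorners y x turns := by
  induction turns with
  | nil => intro y x cs; simp [pvCorners]
  | cons t rest ih =>
      intro y x cs
      simp only [List.foldl_cons, pvCorners, ih, List.append_assoc]
      simp

theorem pvCorners_shift (turns : List ((Int × Int) × Int)) :
    ∀ (y x : Int),
      pvCorners y x turns = (pvCorners 0 0 turns).map (fun p => (p.1 + y, p.2 + x)) := by
  induction turns with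
  | nil => intro y x; simp [pvCorners]
  | cons t rest ih =>
      intro y x
      simp only [pvCorners, List.map_cons, zero_add]
      congr 1
      rw [ih (y + t.1.1 * t.2) (x + t.1.2 * t.2), ih (t.1.1 * t.2) (t.1.2 * t.2)]
      simp only [List.map_map]
      apply List.map_congr_left
      intro p _
      simp only [Function.comp]
      simp only [Prod.mk.injEq]; constructor <;> ring

theorem pvRec_corners (turns : List ((Int × Int) × Int)) :
    (pvRec turns).2 = pvCorners 0 0 turns := by
  induction turns with
  | nil => simp [pvRec, pvCorners]
  | cons t rest ih =>
      simp only [pvRec, pvCorners, ih, zero_add]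
      rw [pvCorners_shift rest (t.1.1 * t.2) (t.1.2 * t.2)]

-- ===== VERDICT =====
theorem build_border_spec : Claim_equal_build_border := by
  intro turns _ _
  show build_border turns = build_border_alt turns
  unfold build_border build_border_alt
  rw [pvA_fold turns 0 0 [], pvRec_corners]
  simp
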